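-- pv_equiv track=rewrite | github.com/Kite7928/mole | backend/app/services/article_image_service.py | _insert_paragraph_images
-- ===== SOURCE A (Python) =====
-- from typing import Dict, List, Optional, Any
--
-- def _insert_paragraph_images(
--
--     content: str,
--     images: List[Dict[str, Any]]
-- ) -> str:
--     """
--     在文章内容中插入段落配图
--
--     策略：
--     1. 在每个 H2 标题后插入一张图片
--     2. 如果段落内容较长（>300字），在段落中间也插入图片
--
--     Args:
--         content: 原始内容（Markdown）
--         images: 段落图片列表
--
--     Returns:
--         插入图片后的内容
--     """
--     import re
--
--     lines = content.split("\n")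
--     new_lines = []
--     image_index = 0
--
--     for i, line in enumerate(lines):
--         new_lines.append(line)
--
--         # 检测 H2 标题（## 开头）
--         if line.startswith("## ") and image_index < len(images):
--             # 在标题后插入图片
--             img = images[image_index]
--             img_markdown = f"\n![段落配图]({img['url']})\n"
--             new_lines.append(img_markdown)
--             image_index += 1
--
--     return "\n".join(new_lines)
-- ===== SOURCE B (Python) =====
-- import re
-- from typing import Dict, List, Any
--
--
-- def _insert_paragraph_images(
--     content: str,
--     images: List[Dict[str, Any]]
-- ) -> str:
--     if not images:
--         return content
--     it = iter(images)
--
--     def repl(m):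
--         return m.group(0) + f"\n\n![段落配图]({next(it)['url']})\n"
--
--     return re.sub(r'(?m)^## .*$', repl, content, count=len(images))
-- ===== Notes on version B (the rewrite author's own statement) =====
-- stated objective: idiomatic
-- what changed: Replaced A's index-tracking loop that appends lines and image markdown to a growing list (then joins) by a single bounded regex substitution re.sub(r'(?m)^## .*$', repl, content, count=len(images)) whose replacement callback consumes the images iterator in order, short-circuiting when images is empty.
import Mathlib
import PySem

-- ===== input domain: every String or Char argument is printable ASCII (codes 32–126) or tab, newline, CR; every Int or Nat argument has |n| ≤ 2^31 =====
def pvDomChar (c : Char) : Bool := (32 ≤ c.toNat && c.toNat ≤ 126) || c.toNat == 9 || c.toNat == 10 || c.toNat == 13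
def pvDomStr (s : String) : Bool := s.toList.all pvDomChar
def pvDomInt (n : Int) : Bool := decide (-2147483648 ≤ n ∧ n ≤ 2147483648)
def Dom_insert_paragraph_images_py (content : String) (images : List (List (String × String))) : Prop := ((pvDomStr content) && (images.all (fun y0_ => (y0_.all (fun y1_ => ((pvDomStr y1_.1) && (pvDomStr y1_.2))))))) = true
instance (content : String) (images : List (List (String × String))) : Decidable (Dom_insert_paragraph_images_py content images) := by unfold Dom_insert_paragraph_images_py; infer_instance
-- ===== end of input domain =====

-- B replaces A's line-by-line append loop (with a running image index) by a single
-- bounded regex substitution over H2 heading lines that consumes the images in order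
-- (short-circuiting when images is empty); objective: idiomatic, same value everywhere A returns.
set_option maxRecDepth 4000


-- ===== PORT A =====
-- one iteration of A's for-loop: append the line; after an H2 heading (while images
-- remain) also append the image markdown and advance image_index.
-- img['url'] is first-match lookup on the association list; a missing 'url' key is a
-- KeyError in Python (excluded by Pre_ below; the port leaves the state unchanged there).
def pvAStep (images : List (List (String × String))) (st : List (List Char) × Nat) (line : List Char) : List (List Char) × Nat :=
  let new_lines := st.1 ++ [line]
  if PySem.Chars.startswith line "## ".toList && decide (st.2 < images.length) then
    match (images.getD st.2 []).lookup "url" with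
    | some u => (new_lines ++ ["\n![段落配图](".toList ++ u.toList ++ ")\n".toList], st.2 + 1)
    | none => (new_lines, st.2)
  else (new_lines, st.2)

def insert_paragraph_images_py (content : String) (images : List (List (String × String))) : String :=
  let lines := PySem.Chars.splitOn content.toList "\n".toList
  let res := lines.foldl (pvAStep images) ([], 0)
  String.ofList (PySem.Chars.join "\n".toList res.1)

-- ===== PORT B =====
-- hand port of re.sub(r'(?m)^## .*$', repl, content, count=len(images)): the line-anchored
-- pattern matches exactly the lines starting with "## " (.* takes the rest of the line,
-- including '\r'), so the substitution rewrites the first len(images) such lines in place;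
-- this recursion over the lines, consuming the image iterator, is exact for that pattern.
def pvBSub : List (List Char) → List (List (String × String)) → List (List Char)
  | [], _ => []
  | l :: ls, [] => l :: pvBSub ls []
  | l :: ls, img :: rest =>
    if PySem.Chars.startswith l "## ".toList then
      (l ++ "\n\n![段落配图](".toList ++ ((img.lookup "url").getD "").toList ++ ")\n".toList) :: pvBSub ls rest
    else l :: pvBSub ls (img :: rest)

def insert_paragraph_images_py_alt (content : String) (images : List (List (String × String))) : String :=
  if images.isEmpty then content
  else String.ofList (PySem.Chars.join "\n".toList (pvBSub (PySem.Chars.splitOn content.toList "\n".toList) images))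

-- ===== PRECONDITION & SPEC =====
-- Pre_ excludes exactly the inputs where A raises KeyError: an image that gets consumed
-- (one of the first min(#H2-lines, len(images)) images) has no 'url' key.
def Pre_insert_paragraph_images_py (content : String) (images : List (List (String × String))) : Prop :=
  ((images.take (((PySem.Chars.splitOn content.toList "\n".toList).filter
      (fun l => PySem.Chars.startswith l "## ".toList)).length)).all
    (fun img => (img.lookup "url").isSome)) = true
instance (content : String) (images : List (List (String × String))) : Decidable (Pre_insert_paragraph_images_py content images) := by unfold Pre_insert_paragraph_images_py; infer_instance
def pvWitness_insert_paragraph_images_py : String × (List (List (String × String))) := ("## t\nbody", [[("url", "x")]])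

def Spec_insert_paragraph_images_py (content : String) (images : List (List (String × String))) (out : String) : Prop := out = insert_paragraph_images_py_alt content images
instance (content : String) (images : List (List (String × String))) (out : String) : Decidable (Spec_insert_paragraph_images_py content images out) := by unfold Spec_insert_paragraph_images_py; infer_instance

-- ===== CLAIM (what is proved, stated in full; the proofs are below) =====
def Claim_equal_insert_paragraph_images_py : Prop := ∀ (content : String) (images : List (List (String × String))), Dom_insert_paragraph_images_py content images → Pre_insert_paragraph_images_py content images → Spec_insert_paragraph_images_py content images (insert_paragraph_images_py content images)

-- ===== LEMMAS AND PROOFS =====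

-- simple recursive characterization of splitting on '\n'
def pvSp : List Char → List (List Char)
  | [] => [[]]
  | c :: rest => if c = '\n' then [] :: pvSp rest
                 else match pvSp rest with
                      | [] => [[c]]
                      | p :: ps => (c :: p) :: ps

def pvMapHd (f : List Char → List Char) : List (List Char) → List (List Char)
  | [] => []
  | p :: ps => f p :: ps

theorem pvSp_ne_nil (cs : List Char) : pvSp cs ≠ [] := by
  cases cs with
  | nil => simp [pvSp]
  | cons c rest =>
    simp only [pvSp]
    split
    · simp
    · split <;> simp

theorem pvGo_eq (fuel : Nat) : ∀ (l cur : List Char) (acc : List (List Char)), l.length < fuel →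
    PySem.Chars.splitOn.go "\n".toList fuel l cur acc
      = acc.reverse ++ pvMapHd (fun p => cur.reverse ++ p) (pvSp l) := by
  induction fuel with
  | zero => intro l cur acc h; omega
  | succ f ih =>
    intro l cur acc h
    cases l with
    | nil =>
      simp [PySem.Chars.splitOn.go, pvSp, pvMapHd]
    | cons c rest =>
      by_cases hc : c = '\n'
      · subst hc
        have hpre : List.isPrefixOf "\n".toList ('\n' :: rest) = true := by
          simp [List.isPrefixOf]
        rw [PySem.Chars.splitOn.go]
        simp only [hpre, if_pos]
        rw [ih _ _ _ (by simpa using Nat.lt_of_succ_lt_succ h)]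
        have hne := pvSp_ne_nil rest
        cases hrest : pvSp rest with
        | nil => exact absurd hrest hne
        | cons p ps => simp [pvSp, hrest, pvMapHd]
      · have hpre : List.isPrefixOf "\n".toList (c :: rest) = false := by
          simp [List.isPrefixOf]
          intro hcontra; exact absurd hcontra.symm hc
        rw [PySem.Chars.splitOn.go]
        simp only [hpre, Bool.false_eq_true, if_false]
        rw [ih _ _ _ (by simp at h; omega)]
        have hne := pvSp_ne_nil rest
        cases hrest : pvSp rest with
        | nil => exact absurd hrest hne
        | cons p ps =>
          simp [pvSp, hc, hrest, pvMapHd]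

theorem pvSplitOn_eq_sp (cs : List Char) : PySem.Chars.splitOn cs "\n".toList = pvSp cs := by
  have h := pvGo_eq (cs.length + 1) cs [] [] (by omega)
  simp only [PySem.Chars.splitOn] at *
  rw [h]
  have hne := pvSp_ne_nil cs
  cases hsp : pvSp cs with
  | nil => exact absurd hsp hne
  | cons p ps => simp [pvMapHd]

theorem pvJoin_sp (cs : List Char) : PySem.Chars.join "\n".toList (pvSp cs) = cs := by
  induction cs with
  | nil => simp [pvSp, PySem.Chars.join_singleton]
  | cons c rest ih =>
    have hne := pvSp_ne_nil rest
    cases hrest : pvSp rest with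
    | nil => exact absurd hrest hne
    | cons p ps =>
      by_cases hc : c = '\n'
      · subst hc
        rw [hrest] at ih
        simp only [pvSp, if_pos, hrest]
        rw [PySem.Chars.join_cons_cons]
        simpa using ih
      · rw [hrest] at ih
        cases ps with
        | nil =>
          rw [PySem.Chars.join_singleton] at ih
          simp [pvSp, hc, hrest, PySem.Chars.join_singleton, ih]
        | cons q qs =>
          rw [PySem.Chars.join_cons_cons] at ih
          simp only [pvSp, hc, hrest, if_false, PySem.Chars.join_cons_cons]
          simpa using ih

theorem pvRoundtrip (cs : List Char) : PySem.Chars.join "\n".toList (PySem.Chars.splitOn cs "\n".toList) = cs := by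
  rw [pvSplitOn_eq_sp, pvJoin_sp]

-- A's loop output as a pure recursion on the lines and the remaining images
def pvMixA : List (List Char) → List (List (String × String)) → List (List Char)
  | [], _ => []
  | l :: ls, imgs =>
    if PySem.Chars.startswith l "## ".toList then
      match imgs with
      | [] => l :: pvMixA ls []
      | img :: rest =>
        match img.lookup "url" with
        | some u => l :: ("\n![段落配图](".toList ++ u.toList ++ ")\n".toList) :: pvMixA ls rest
        | none => l :: pvMixA ls (img :: rest)
    else l :: pvMixA ls imgs

theorem pvFold_eq (images : List (List (String × String))) :
    ∀ (lines : List (List Char)) (acc : List (List Char)) (k : Nat),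
    (lines.foldl (pvAStep images) (acc, k)).1 = acc ++ pvMixA lines (images.drop k) := by
  intro lines
  induction lines with
  | nil => intro acc k; simp [pvMixA]
  | cons l ls ih =>
    intro acc k
    rw [List.foldl_cons]
    by_cases hs : PySem.Chars.startswith l "## ".toList = true
    · by_cases hk : k < images.length
      · have hdrop : images.drop k = images[k] :: images.drop (k + 1) := List.drop_eq_getElem_cons hk
        have hgetD : images.getD k [] = images[k]'hk := by
          simp [List.getD_eq_getElem?_getD, List.getElem?_eq_getElem hk]
        cases hlk : (images[k]'hk).lookup "url" with
        | some u =>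
          have hstep : pvAStep images (acc, k) l
              = (acc ++ [l] ++ ["\n![段落配图](".toList ++ u.toList ++ ")\n".toList], k + 1) := by
            unfold pvAStep
            rw [hs, hgetD, hlk]
            simp [hk]
          rw [hstep, ih, hdrop]
          simp only [pvMixA, hs, if_pos, hlk]
          simp
        | none =>
          have hstep : pvAStep images (acc, k) l = (acc ++ [l], k) := by
            unfold pvAStep
            rw [hs, hgetD, hlk]
            simp [hk]
          rw [hstep, ih, hdrop]
          simp only [pvMixA, hs, if_pos, hlk]
          simp [← hdrop]
      · have hdrop : images.drop k = [] := List.drop_eq_nil_of_le (by omega)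
        have hstep : pvAStep images (acc, k) l = (acc ++ [l], k) := by
          unfold pvAStep
          rw [hs]
          simp [hk]
        rw [hstep, ih, hdrop]
        simp only [pvMixA, hs, if_pos]
        simp
    · have hs' := Bool.not_eq_true _ |>.mp hs
      have hstep : pvAStep images (acc, k) l = (acc ++ [l], k) := by
        unfold pvAStep
        rw [hs']
        simp
      rw [hstep, ih]
      simp only [pvMixA, hs', Bool.false_eq_true, if_false]
      simp

theorem pvMixA_nil_images (lines : List (List Char)) : pvMixA lines [] = lines := by
  induction lines with
  | nil => rfl
  | cons l ls ih => by_cases hs : PySem.Chars.startswith l "## ".toList = true <;> simp [pvMixA, ih]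

theorem pvBSub_nil_images (lines : List (List Char)) : pvBSub lines [] = lines := by
  induction lines with
  | nil => rfl
  | cons l ls ih => simp [pvBSub, ih]

theorem pvJoin_cons (sep x : List Char) (t : List (List Char)) :
    PySem.Chars.join sep (x :: t) = x ++ (if t = [] then [] else sep ++ PySem.Chars.join sep t) := by
  cases t with
  | nil => simp [PySem.Chars.join_singleton]
  | cons y ys => rw [PySem.Chars.join_cons_cons]; simp

theorem pvMixA_ne_nil (l : List Char) (ls : List (List Char)) (imgs : List (List (String × String))) :
    pvMixA (l :: ls) imgs ≠ [] := by
  by_cases hs : PySem.Chars.startswith l "## ".toList = true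
  · simp only [pvMixA, hs, if_pos]
    cases imgs with
    | nil => simp
    | cons img rest => cases hlk : img.lookup "url" <;> simp [hlk]
  · simp only [pvMixA, Bool.not_eq_true _ |>.mp hs, Bool.false_eq_true, if_false]
    simp

theorem pvBSub_ne_nil (l : List Char) (ls : List (List Char)) (imgs : List (List (String × String))) :
    pvBSub (l :: ls) imgs ≠ [] := by
  cases imgs with
  | nil => simp [pvBSub]
  | cons img rest =>
    simp only [pvBSub]
    split <;> simp

theorem pvJoin_mixA_eq_bSub : ∀ (lines : List (List Char)) (imgs : List (List (String × String))),
    ((imgs.take ((lines.filter (fun l => PySem.Chars.startswith l "## ".toList)).length)).all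
      (fun img => (img.lookup "url").isSome)) = true →
    PySem.Chars.join "\n".toList (pvMixA lines imgs) = PySem.Chars.join "\n".toList (pvBSub lines imgs) := by
  intro lines
  induction lines with
  | nil => intro imgs _; simp [pvMixA, pvBSub]
  | cons l ls ih =>
    intro imgs hpre
    by_cases hs : PySem.Chars.startswith l "## ".toList = true
    · cases imgs with
      | nil =>
        simp only [pvMixA, pvBSub, hs, if_pos, pvMixA_nil_images, pvBSub_nil_images]
      | cons img rest =>
        simp only [List.filter_cons, hs, if_pos, List.length_cons, List.take_succ_cons,
          List.all_cons, Bool.and_eq_true] at hpre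
        obtain ⟨hurl, hrest⟩ := hpre
        cases hlk : img.lookup "url" with
        | none => rw [hlk] at hurl; simp at hurl
        | some u =>
          have hih := ih rest hrest
          simp only [pvMixA, pvBSub, hs, if_pos, hlk, Option.getD_some]
          cases ls with
          | nil =>
            simp only [pvMixA, pvBSub]
            rw [pvJoin_cons, pvJoin_cons, pvJoin_cons]
            simp
          | cons l2 ls2 =>
            have hmne := pvMixA_ne_nil l2 ls2 rest
            have hbne := pvBSub_ne_nil l2 ls2 rest
            rw [pvJoin_cons "\n".toList l, pvJoin_cons "\n".toList _ (pvMixA (l2 :: ls2) rest),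
              pvJoin_cons "\n".toList _ (pvBSub (l2 :: ls2) rest)]
            rw [if_neg hmne, if_neg hbne, if_neg (by simp)]
            rw [hih]
            simp
    · have hs' := Bool.not_eq_true _ |>.mp hs
      simp only [List.filter_cons, hs', Bool.false_eq_true, if_false] at hpre
      cases imgs with
      | nil =>
        simp only [pvMixA, pvBSub, hs', Bool.false_eq_true, if_false, pvMixA_nil_images,
          pvBSub_nil_images]
      | cons img rest =>
        have hih := ih (img :: rest) hpre
        simp only [pvMixA, pvBSub, hs', Bool.false_eq_true, if_false]
        cases ls with
        | nil => simp [pvMixA, pvBSub]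
        | cons l2 ls2 =>
          have hmne := pvMixA_ne_nil l2 ls2 (img :: rest)
          have hbne := pvBSub_ne_nil l2 ls2 (img :: rest)
          rw [pvJoin_cons, pvJoin_cons, if_neg hmne, if_neg hbne, hih]

-- ===== VERDICT (by name: the statement is the Claim_ definition above) =====
theorem insert_paragraph_images_py_spec : Claim_equal_insert_paragraph_images_py := by
  intro content images _hdom hpre
  unfold Spec_insert_paragraph_images_py insert_paragraph_images_py insert_paragraph_images_py_alt
  by_cases hnil : images.isEmpty
  · simp only [hnil, if_pos]
    rw [List.isEmpty_iff] at hnil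
    subst hnil
    rw [pvFold_eq]
    simp only [List.drop_nil, List.nil_append, pvMixA_nil_images]
    rw [pvRoundtrip]
    simp
  · simp only [hnil, Bool.false_eq_true, if_false]
    rw [pvFold_eq]
    simp only [List.drop_zero, List.nil_append]
    rw [pvJoin_mixA_eq_bSub _ _ hpre]
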